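-- pv_equiv track=rewrite | github.com/ahmetdenizeroz/ME461_BizimBulbuller | Final/ImgProc/GridDetection4.py | sort_intersections
-- ===== SOURCE A (Python) =====
-- def sort_intersections(intersections):
--     """
--     Sorts intersections into (m+1) x (n+1) structured grid.
--     Ensures each row and column is ordered correctly.
--     """
--     if not intersections:
--         return []
--
--     intersections = sorted(intersections, key=lambda pt: (pt[1], pt[0]))  # Sort by y, then x
--
--     # Sort into rows
--     grid_rows = []
--     row_tolerance = 20  # Max distance in y-axis to consider as same row
--
--     current_row = [intersections[0]]
--     for i in range(1, len(intersections)):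
--         if abs(intersections[i][1] - current_row[-1][1]) < row_tolerance:
--             current_row.append(intersections[i])
--         else:
--             grid_rows.append(sorted(current_row, key=lambda pt: pt[0]))  # Sort by x within row
--             current_row = [intersections[i]]
--
--     grid_rows.append(sorted(current_row, key=lambda pt: pt[0]))
--
--     return grid_rows
-- ===== SOURCE B (Python) =====
-- def sort_intersections(intersections):
--     """
--     Two-pass reformulation: sort by (y, x), label each point with a row
--     number (incrementing at y-gaps >= 20 from the previous point), then
--     group points by label and sort each row by x.
--     """
--     if not intersections:
--         return []
--
--     pts = sorted(intersections, key=lambda pt: (pt[1], pt[0]))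
--
--     # Pass 1: row label for each point (label of pts[0] is 0).
--     labels = [0]
--     for prev, cur in zip(pts, pts[1:]):
--         labels.append(labels[-1] + (1 if abs(cur[1] - prev[1]) >= 20 else 0))
--
--     # Pass 2: group by label (labels are 0,0,...,1,...,k in order).
--     rows = []
--     for lab, pt in zip(labels, pts):
--         if lab == len(rows):
--             rows.append([pt])
--         else:
--             rows[-1].append(pt)
--
--     return [sorted(row, key=lambda pt: pt[0]) for row in rows]
-- ===== Notes on version B (the rewrite author's own statement) =====
-- stated objective: alternative
-- what changed: Replaces A's single fused loop (carrying the current row and flushing it x-sorted at every gap) by a decomposition into three passes: compute an integer row label per point, group points by label, then x-sort every row in a final comprehension.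
import Mathlib
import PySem

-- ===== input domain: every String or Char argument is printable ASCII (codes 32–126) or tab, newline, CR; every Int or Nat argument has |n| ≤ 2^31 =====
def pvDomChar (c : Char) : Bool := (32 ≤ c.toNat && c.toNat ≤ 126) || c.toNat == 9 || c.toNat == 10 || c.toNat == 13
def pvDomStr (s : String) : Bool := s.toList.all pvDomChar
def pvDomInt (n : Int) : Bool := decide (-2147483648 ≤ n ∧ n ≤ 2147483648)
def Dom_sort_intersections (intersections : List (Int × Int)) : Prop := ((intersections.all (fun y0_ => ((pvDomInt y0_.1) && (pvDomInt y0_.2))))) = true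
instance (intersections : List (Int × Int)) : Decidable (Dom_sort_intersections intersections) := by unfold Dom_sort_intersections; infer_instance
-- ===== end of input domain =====

-- B restates A's single fused gap-splitting loop as three passes (row labels, grouping by label, final x-sort comprehension); alternative decomposition, same cost.

-- ===== PORT A =====
-- sorted(row, key=lambda pt: pt[0])
def pvSortX (row : List (Int × Int)) : List (Int × Int) :=
  PySem.List.sorted row (fun pt => pt.1) false

-- the 'for i in range(1, len(intersections))' loop: state (current_row, grid_rows);
-- current_row[-1] is pyGetD cur (-1) (cur is never empty)
def pvALoop : List (Int × Int) → List (Int × Int) → List (List (Int × Int)) → List (List (Int × Int))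
  | [], cur, rows => rows ++ [pvSortX cur]
  | q :: rest, cur, rows =>
      if |q.2 - (PySem.List.pyGetD cur (-1) (0, 0)).2| < 20 then
        pvALoop rest (cur ++ [q]) rows
      else
        pvALoop rest [q] (rows ++ [pvSortX cur])

def sort_intersections (intersections : List (Int × Int)) : List (List (Int × Int)) :=
  if intersections = [] then []
  else
    let pts := PySem.List.sorted2 intersections (fun pt => pt.2) (fun pt => pt.1)
    pvALoop (pts.drop 1) [PySem.List.pyGetD pts 0 (0, 0)] []

-- ===== PORT B =====
-- pass 1: 'for prev, cur in zip(pts, pts[1:]): labels.append(labels[-1] + …)';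
-- lab carries labels[-1], prev carries the previous point
def pvMkLabels (prev : Int × Int) (lab : Int) : List (Int × Int) → List Int
  | [] => []
  | q :: rest =>
      let lab' := lab + (if 20 ≤ |q.2 - prev.2| then 1 else 0)
      lab' :: pvMkLabels q lab' rest

-- pass 2: 'for lab, pt in zip(labels, pts)': append a new row or extend rows[-1]
def pvGroup : List (Int × (Int × Int)) → List (List (Int × Int)) → List (List (Int × Int))
  | [], rows => rows
  | (lab, pt) :: rest, rows =>
      if lab = PySem.List.len rows then
        pvGroup rest (rows ++ [[pt]])
      else
        pvGroup rest (rows.dropLast ++ [(PySem.List.pyGetD rows (-1) []) ++ [pt]])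

def sort_intersections_alt (intersections : List (Int × Int)) : List (List (Int × Int)) :=
  if intersections = [] then []
  else
    let pts := PySem.List.sorted2 intersections (fun pt => pt.2) (fun pt => pt.1)
    let labels : List Int := 0 :: pvMkLabels (PySem.List.pyGetD pts 0 (0, 0)) 0 (pts.drop 1)
    let rows := pvGroup (List.zip labels pts) []
    rows.map pvSortX

-- ===== PRECONDITION & SPEC =====
def Spec_sort_intersections (intersections : List (Int × Int)) (out : List (List (Int × Int))) : Prop := out = sort_intersections_alt intersections
instance (intersections : List (Int × Int)) (out : List (List (Int × Int))) : Decidable (Spec_sort_intersections intersections out) := by unfold Spec_sort_intersections; infer_instance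

-- ===== CLAIM (what is proved, stated in full; the proofs are below) =====
def Claim_equal_sort_intersections : Prop := ∀ (intersections : List (Int × Int)), Dom_sort_intersections intersections → Spec_sort_intersections intersections (sort_intersections intersections)

-- ===== LEMMAS AND PROOFS =====

-- canonical splitting of the y-sorted tail into raw rows
def pvChunk (prev : Int × Int) (acc : List (Int × Int)) : List (Int × Int) → List (List (Int × Int))
  | [] => [acc]
  | q :: rest =>
      if 20 ≤ |q.2 - prev.2| then acc :: pvChunk q [q] rest
      else pvChunk q (acc ++ [q]) rest

theorem pvALoop_eq_chunk (rest : List (Int × Int)) :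
    ∀ (prev : Int × Int) (pre : List (Int × Int)) (rows : List (List (Int × Int))),
      pvALoop rest (pre ++ [prev]) rows = rows ++ (pvChunk prev (pre ++ [prev]) rest).map pvSortX := by
  induction rest with
  | nil => intro prev pre rows; simp [pvALoop, pvChunk]
  | cons q rest ih =>
      intro prev pre rows
      simp only [pvALoop, pvChunk, PySem.List.pyGetD_neg_one_append_singleton]
      by_cases h : 20 ≤ |q.2 - prev.2|
      · have h' : ¬ |q.2 - prev.2| < 20 := by omega
        simp only [h, h', if_true, if_false]
        have := ih q [] (rows ++ [pvSortX (pre ++ [prev])])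
        simpa [List.append_assoc] using this
      · have h' : |q.2 - prev.2| < 20 := by omega
        simp only [h, h', if_true, if_false]
        have := ih q (pre ++ [prev]) rows
        simpa [List.append_assoc] using this

theorem pvGroup_eq_chunk (rest : List (Int × Int)) :
    ∀ (prev : Int × Int) (acc : List (Int × Int)) (rows : List (List (Int × Int))),
      pvGroup (List.zip (pvMkLabels prev (PySem.List.len rows) rest) rest) (rows ++ [acc]) =
        rows ++ pvChunk prev acc rest := by
  induction rest with
  | nil => intro prev acc rows; simp [pvMkLabels, pvGroup, pvChunk]
  | cons q rest ih =>
      intro prev acc rows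
      simp only [pvMkLabels, pvChunk, List.zip_cons_cons, pvGroup]
      by_cases h : 20 ≤ |q.2 - prev.2|
      · simp only [h, if_true]
        have hlab : PySem.List.len rows + 1 = PySem.List.len (rows ++ [acc]) := by
          simp [PySem.List.len_eq]
        rw [if_pos hlab]
        have := ih q [q] (rows ++ [acc])
        rw [hlab] at *
        simpa [List.append_assoc] using this
      · simp only [h, if_false, add_zero]
        have hlab : ¬ (PySem.List.len rows = PySem.List.len (rows ++ [acc])) := by
          simp only [PySem.List.len_eq, List.length_append, List.length_cons, List.length_nil]
          omega
        rw [if_neg hlab]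
        have hdrop : (rows ++ [acc]).dropLast = rows := by simp
        have hlast : PySem.List.pyGetD (rows ++ [acc]) (-1) [] = acc :=
          PySem.List.pyGetD_neg_one_append_singleton rows acc []
        rw [hdrop, hlast]
        exact ih q (acc ++ [q]) rows

-- ===== VERDICT (by name: the statement is the Claim_ definition above) =====
theorem sort_intersections_spec : Claim_equal_sort_intersections := by
  intro intersections _
  unfold Spec_sort_intersections sort_intersections sort_intersections_alt
  by_cases hnil : intersections = []
  · simp [hnil]
  · simp only [hnil, if_false]
    generalize hpts : PySem.List.sorted2 intersections (fun pt => pt.2) (fun pt => pt.1) = pts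
    have hne : pts ≠ [] := by
      intro h
      apply hnil
      have hp := PySem.List.sorted2_perm (xs := intersections) (k1 := fun pt : Int × Int => pt.2) (k2 := fun pt : Int × Int => pt.1) (rev := false)
      rw [hpts, h] at hp
      exact (List.Perm.nil_eq hp).symm
    obtain ⟨p, t, rfl⟩ : ∃ p t, pts = p :: t := by
      cases pts with
      | nil => exact absurd rfl hne
      | cons p t => exact ⟨p, t, rfl⟩
    simp only [PySem.List.pyGetD_zero_cons, List.drop_one, List.tail_cons]
    have hA := pvALoop_eq_chunk t p [] []
    have hB := pvGroup_eq_chunk t p [p] []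
    simp only [List.nil_append] at hA hB
    rw [hA]
    have hzip : List.zip (0 :: pvMkLabels p 0 t) (p :: t) =
        (0, p) :: List.zip (pvMkLabels p 0 t) t := rfl
    rw [hzip]
    simp only [pvGroup]
    have h0 : (0 : Int) = PySem.List.len ([] : List (List (Int × Int))) := by
      simp [PySem.List.len_eq]
    rw [if_pos h0]
    have hlen0 : (PySem.List.len ([] : List (List (Int × Int)))) = 0 := by
      simp [PySem.List.len_eq]
    have hB' := pvGroup_eq_chunk t p [p] []
    simp only [hlen0, List.nil_append] at hB'
    simp only [List.nil_append]
    rw [hB']
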